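-- pv_equiv track=rewrite | github.com/stevensshi/kaggle-jane-street-2024 | src/online_learning.py | build_time_step_index
-- ===== SOURCE A (Python) =====
-- def build_time_step_index(date_ids, time_ids):
--     """Build index of (start, end) for each unique (date_id, time_id)."""
--     n = len(date_ids)
--     groups = []
--     start = 0
--     for i in range(1, n):
--         if date_ids[i] != date_ids[i - 1] or time_ids[i] != time_ids[i - 1]:
--             groups.append((start, i))
--             start = i
--     groups.append((start, n))
--     return groups
-- ===== SOURCE B (Python) =====
-- def build_time_step_index(date_ids, time_ids):
--     """Build index of (start, end) for each unique (date_id, time_id)."""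
--     n = len(date_ids)
--     groups = []
--     s = 0
--     while s < n:
--         e = s + 1
--         while e < n and date_ids[e] == date_ids[s] and time_ids[e] == time_ids[s]:
--             e += 1
--         groups.append((s, e))
--         s = e
--     return groups
-- ===== Notes on version B (the rewrite author's own statement) =====
-- stated objective: alternative
-- what changed: B is a run-length scanner: an outer loop over groups whose inner loop advances a second pointer while elements equal the run HEAD, emitting (s,e) per run, instead of A's single index pass that detects transitions against the PREVIOUS element with a running start.
-- intended difference: On empty date_ids A returns the degenerate segment [(0,0)] (an artefact of its unconditional final append); B returns [], the intended empty index for empty input. — e.g. on build_time_step_index([], []): A returns [(0, 0)], B returns []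
import Mathlib
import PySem

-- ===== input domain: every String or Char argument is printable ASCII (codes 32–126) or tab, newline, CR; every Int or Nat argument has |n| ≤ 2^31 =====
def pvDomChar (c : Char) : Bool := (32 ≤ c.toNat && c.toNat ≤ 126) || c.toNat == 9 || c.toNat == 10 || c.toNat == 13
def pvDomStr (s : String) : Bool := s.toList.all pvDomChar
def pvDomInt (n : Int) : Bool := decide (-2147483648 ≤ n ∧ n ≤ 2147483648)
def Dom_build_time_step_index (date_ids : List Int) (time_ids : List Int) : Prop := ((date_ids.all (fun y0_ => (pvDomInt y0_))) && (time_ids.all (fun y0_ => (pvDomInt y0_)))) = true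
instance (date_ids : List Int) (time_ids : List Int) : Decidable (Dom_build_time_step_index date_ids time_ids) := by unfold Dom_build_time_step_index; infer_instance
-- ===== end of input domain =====

-- B scans run-by-run (inner loop comparing to the run head) instead of A's transition
-- detection against the previous element; on empty date_ids B returns [] where A
-- returns the degenerate [(0,0)] (stated as an intended difference D_ below).


-- ===== PORT A =====
-- A's transition test date_ids[i] != date_ids[i-1] or time_ids[i] != time_ids[i-1];
-- pyGet? with .getD 0 is exact inside Pre_, where every index Python reads is in range.
def pvCut (date_ids : List Int) (time_ids : List Int) (i : Int) : Bool :=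
  (PySem.List.pyGet? date_ids i).getD 0 != (PySem.List.pyGet? date_ids (i - 1)).getD 0 ||
  (PySem.List.pyGet? time_ids i).getD 0 != (PySem.List.pyGet? time_ids (i - 1)).getD 0

def build_time_step_index (date_ids : List Int) (time_ids : List Int) : List (Int × Int) :=
  let n : Int := date_ids.length
  let st : List (Int × Int) × Int :=
    (PySem.List.pyRange 1 n 1).foldl
      (fun s i => if pvCut date_ids time_ids i then (s.1 ++ [(s.2, i)], i) else s)
      ([], 0)
  st.1 ++ [(st.2, n)]

-- ===== PORT B =====
-- B's run-membership test date_ids[e] == date_ids[s] and time_ids[e] == time_ids[s]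
-- (same getD-0 totalisation, exact inside Pre_).
def pvEq (date_ids : List Int) (time_ids : List Int) (e s : Int) : Bool :=
  ((PySem.List.pyGet? date_ids e).getD 0 == (PySem.List.pyGet? date_ids s).getD 0) &&
  ((PySem.List.pyGet? time_ids e).getD 0 == (PySem.List.pyGet? time_ids s).getD 0)

-- inner while loop: advance e while e < n and the element still equals the run head s
def pvRunEnd (d t : List Int) (n s e : Int) : Int :=
  if h : e < n ∧ pvEq d t e s = true then pvRunEnd d t n s (e + 1) else e
termination_by (n - e).toNat
decreasing_by omega

-- the port's outer loop needs e > s for termination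
theorem pvRunEnd_ge (d t : List Int) (n s e : Int) : e ≤ pvRunEnd d t n s e := by
  unfold pvRunEnd
  split
  · have := pvRunEnd_ge d t n s (e + 1); omega
  · omega
termination_by (n - e).toNat
decreasing_by omega

-- outer while loop: one group per run
def pvRuns (d t : List Int) (n s : Int) : List (Int × Int) :=
  if hs : s < n then
    let e := pvRunEnd d t n s (s + 1)
    (s, e) :: pvRuns d t n e
  else []
termination_by (n - s).toNat
decreasing_by
  have := pvRunEnd_ge d t n s (s + 1); omega

def build_time_step_index_alt (date_ids : List Int) (time_ids : List Int) : List (Int × Int) :=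
  pvRuns date_ids time_ids date_ids.length 0

-- ===== PRECONDITION & SPEC =====
-- Pre_ excludes exactly the inputs where Python A raises IndexError: some i in
-- range(1, len(date_ids)) at which the dates are equal (so the short-circuiting `or`
-- reaches time_ids[i]) while i is out of range for time_ids.  (B raises there too.)
def Pre_build_time_step_index (date_ids : List Int) (time_ids : List Int) : Prop :=
  ∀ i : Nat, i < date_ids.length →
    (0 < i → date_ids.getD i 0 = date_ids.getD (i - 1) 0 → i < time_ids.length)
instance (date_ids : List Int) (time_ids : List Int) : Decidable (Pre_build_time_step_index date_ids time_ids) := by unfold Pre_build_time_step_index; infer_instance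
def pvWitness_build_time_step_index : List Int × List Int := ([1, 1, 2], [0, 1, 1])

-- On empty date_ids A returns the degenerate segment [(0,0)] — an artefact of its
-- unconditional final append — while B returns [], the intended empty index.
def D_build_time_step_index (date_ids : List Int) (time_ids : List Int) : Prop :=
  date_ids = []
instance (date_ids : List Int) (time_ids : List Int) : Decidable (D_build_time_step_index date_ids time_ids) := by unfold D_build_time_step_index; infer_instance

def Spec_build_time_step_index (date_ids : List Int) (time_ids : List Int) (out : List (Int × Int)) : Prop := ¬ D_build_time_step_index date_ids time_ids → out = build_time_step_index_alt date_ids time_ids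
instance (date_ids : List Int) (time_ids : List Int) (out : List (Int × Int)) : Decidable (Spec_build_time_step_index date_ids time_ids out) := by unfold Spec_build_time_step_index; infer_instance

def pvDiffWitness_build_time_step_index : List Int × List Int := ([], [])
def pvDiffWitnessOut_build_time_step_index : (List (Int × Int)) × (List (Int × Int)) := ([(0, 0)], [])

-- ===== CLAIM (what is proved, stated in full; the proofs are below) =====
def Claim_unchanged_build_time_step_index : Prop := ∀ (date_ids : List Int) (time_ids : List Int), Dom_build_time_step_index date_ids time_ids → Pre_build_time_step_index date_ids time_ids → Spec_build_time_step_index date_ids time_ids (build_time_step_index date_ids time_ids)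
def Claim_changed_build_time_step_index : Prop := Dom_build_time_step_index (pvDiffWitness_build_time_step_index.1) (pvDiffWitness_build_time_step_index.2) ∧ Pre_build_time_step_index (pvDiffWitness_build_time_step_index.1) (pvDiffWitness_build_time_step_index.2) ∧ D_build_time_step_index (pvDiffWitness_build_time_step_index.1) (pvDiffWitness_build_time_step_index.2) ∧ build_time_step_index (pvDiffWitness_build_time_step_index.1) (pvDiffWitness_build_time_step_index.2) = pvDiffWitnessOut_build_time_step_index.1 ∧ build_time_step_index_alt (pvDiffWitness_build_time_step_index.1) (pvDiffWitness_build_time_step_index.2) = pvDiffWitnessOut_build_time_step_index.2 ∧ pvDiffWitnessOut_build_time_step_index.1 ≠ pvDiffWitnessOut_build_time_step_index.2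
def Claim_exact_build_time_step_index : Prop := ∀ (date_ids : List Int) (time_ids : List Int), Dom_build_time_step_index date_ids time_ids → Pre_build_time_step_index date_ids time_ids → D_build_time_step_index date_ids time_ids → build_time_step_index date_ids time_ids ≠ build_time_step_index_alt date_ids time_ids

-- ===== LEMMAS AND PROOFS =====

-- pvRunEnd's exit facts: the run s..R-1 all equal the head, the element at R (if any)
-- does not, and R stays within (e, n].
theorem pvRunEnd_spec (d t : List Int) (n s e : Int)
    (hinv : ∀ j, s < j → j < e → pvEq d t j s = true) (hen : e ≤ n) :
    (∀ j, s < j → j < pvRunEnd d t n s e → pvEq d t j s = true) ∧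
    (pvRunEnd d t n s e < n → pvEq d t (pvRunEnd d t n s e) s = false) ∧
    pvRunEnd d t n s e ≤ n := by
  unfold pvRunEnd
  split
  next h =>
    exact pvRunEnd_spec d t n s (e + 1)
      (fun j hj1 hj2 => by
        rcases lt_or_eq_of_le (by omega : j ≤ e) with hlt | heq
        · exact hinv j hj1 hlt
        · subst heq; exact h.2) (by omega)
  next h =>
    refine ⟨hinv, fun hlt => ?_, hen⟩
    by_contra hne
    exact h ⟨hlt, by revert hne; cases pvEq d t e s <;> simp⟩
termination_by (n - e).toNat
decreasing_by omega

-- A's transition test is false inside a run and true at its boundary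
theorem pvCut_false (d t : List Int) (s i : Int)
    (hi : pvEq d t i s = true) (hprev : pvEq d t (i - 1) s = true) :
    pvCut d t i = false := by
  simp [pvEq] at hi hprev
  simp [pvCut, hi.1, hi.2, hprev.1, hprev.2]

theorem pvCut_true (d t : List Int) (s i : Int)
    (hi : pvEq d t i s = false) (hprev : pvEq d t (i - 1) s = true) :
    pvCut d t i = true := by
  simp [pvEq] at hi hprev
  simp [pvCut, hprev.1, hprev.2]
  tauto

-- folding A's step over a cut-free index list is the identity
theorem pvFold_id (d t : List Int) (L : List Int)
    (hL : ∀ i ∈ L, pvCut d t i = false) (x : List (Int × Int) × Int) :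
    L.foldl (fun st i => if pvCut d t i then (st.1 ++ [(st.2, i)], i) else st) x = x := by
  induction L generalizing x with
  | nil => simp
  | cons i L ih =>
      have hi : pvCut d t i = false := hL i (by simp)
      simp only [List.foldl_cons, hi, Bool.false_eq_true, if_false]
      exact ih (fun j hj => hL j (by simp [hj])) x

-- main correspondence: A's fold from start s with accumulator gs produces gs ++ the runs
theorem pvFold_runs (d t : List Int) (n : Int) (fuel : Nat) :
    ∀ s gs, s < n → (n - s).toNat ≤ fuel →
      (let st := (PySem.List.pyRange (s + 1) n 1).foldl
          (fun st i => if pvCut d t i then (st.1 ++ [(st.2, i)], i) else st) (gs, s)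
       st.1 ++ [(st.2, n)]) = gs ++ pvRuns d t n s := by
  induction fuel with
  | zero => intro s gs hs hf; omega
  | succ fuel ih =>
      intro s gs hs hf
      have hge : s + 1 ≤ pvRunEnd d t n s (s + 1) := pvRunEnd_ge d t n s (s + 1)
      obtain ⟨hrun, hbound, hle⟩ :=
        pvRunEnd_spec d t n s (s + 1) (fun j h1 h2 => by omega) (by omega)
      rw [pvRuns]
      simp only [hs, dif_pos]
      rw [PySem.List.pyRange_one_append (s + 1) (pvRunEnd d t n s (s + 1)) n (by omega) hle]
      simp only [List.foldl_append]
      rw [pvFold_id d t _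
        (fun i hi => by
          rw [PySem.List.mem_pyRange_one] at hi
          refine pvCut_false d t s i (hrun i (by omega) hi.2) ?_
          rcases lt_or_eq_of_le (by omega : s ≤ i - 1) with h1 | h1
          · exact hrun (i - 1) h1 (by omega)
          · rw [← h1]; simp [pvEq]) (gs, s)]
      rcases lt_or_eq_of_le hle with hRn | hRn
      · rw [PySem.List.pyRange_one_cons hRn]
        have hcut : pvCut d t (pvRunEnd d t n s (s + 1)) = true := by
          refine pvCut_true d t s _ (hbound hRn) ?_
          rcases lt_or_eq_of_le (by omega : s ≤ pvRunEnd d t n s (s + 1) - 1) with h1 | h1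
          · exact hrun _ h1 (by omega)
          · rw [← h1]; simp [pvEq]
        simp only [List.foldl_cons, hcut, if_true]
        have h2 := ih (pvRunEnd d t n s (s + 1)) (gs ++ [(s, pvRunEnd d t n s (s + 1))])
          hRn (by omega)
        simp only at h2
        rw [h2]
        simp
      · rw [hRn, PySem.List.pyRange_one_eq_nil (le_refl n)]
        rw [pvRuns]
        simp

-- closed-form values of both ports on empty date_ids (pvRuns is WF-recursive, so
-- the kernel cannot evaluate it by `decide`; these unfold it by its equation)
theorem pvA_nil (t : List Int) : build_time_step_index [] t = [(0, 0)] := by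
  simp [build_time_step_index, PySem.List.pyRange_one_eq_nil]

theorem pvB_nil (t : List Int) : build_time_step_index_alt [] t = [] := by
  unfold build_time_step_index_alt
  rw [pvRuns]
  simp

-- ===== VERDICT (by name: the statement is the Claim_ definition above) =====
theorem build_time_step_index_spec : Claim_unchanged_build_time_step_index := by
  intro d t _ _ hD
  show build_time_step_index d t = build_time_step_index_alt d t
  have hne : d ≠ [] := hD
  have hn : (0 : Int) < d.length := by
    have := List.length_pos_of_ne_nil hne
    exact_mod_cast this
  unfold build_time_step_index build_time_step_index_alt
  have h := pvFold_runs d t d.length ((d.length : Int) - 0).toNat 0 [] hn (le_refl _)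
  simpa using h

theorem build_time_step_index_changed : Claim_changed_build_time_step_index := by
  unfold Claim_changed_build_time_step_index
  refine ⟨by decide, by decide, by decide, ?_, ?_, by decide⟩
  · exact pvA_nil []
  · exact pvB_nil []

theorem build_time_step_index_tight : Claim_exact_build_time_step_index := by
  intro d t _ _ hD
  subst hD
  rw [pvA_nil, pvB_nil]
  simp
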